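-- pv_equiv track=rewrite | github.com/MoPinghui/mz_calen | mdisplay.py | name2color
-- ===== SOURCE A (Python) =====
-- def name2color(name=""):
--     """: 使用字符串直接生成唯一的颜色
--     """
--     h = bytes(name, 'utf-8').hex()
--     nh = (len(h) // 6) + 1
--     nh2 = nh * 6
--     if len(h) < nh2:
--         h += "0"*(nh2-len(h))
--     #
--     r, g, b = 256, 256, 256
--     for ii in range(nh):
--         hi = h[ii*6:(ii+1)*6]
--         r += int(hi[0:2], 16)*(ii+1)*3
--         g += int(hi[2:4], 16)*(ii+1)*5
--         b += int(hi[4:6], 16)*(ii+1)*7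
--     #
--     r = hex(r).replace('0x','')[-2:]
--     g = hex(g).replace('0x','')[-2:]
--     b = hex(b).replace('0x','')[-2:]
--     c = "#"+r+g+b
--     return c
-- ===== SOURCE B (Python) =====
-- def name2color(name=""):
--     """: 使用字符串直接生成唯一的颜色
--     """
--     data = bytes(name, 'utf-8')
--     nh = len(data) // 3 + 1
--     data = data + b"\x00" * (nh * 3 - len(data))
--     #
--     r = 256
--     for i, v in enumerate(data[0::3]):
--         r += (i + 1) * 3 * v
--     g = 256
--     for i, v in enumerate(data[1::3]):
--         g += (i + 1) * 5 * v
--     b = 256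
--     for i, v in enumerate(data[2::3]):
--         b += (i + 1) * 7 * v
--     #
--     r = hex(r).replace('0x', '')[-2:]
--     g = hex(g).replace('0x', '')[-2:]
--     b = hex(b).replace('0x', '')[-2:]
--     return "#" + r + g + b
-- ===== Notes on version B (the rewrite author's own statement) =====
-- stated objective: faster
-- what changed: B works on the raw utf-8 bytes instead of their hex-string rendering: it pads the byte list to a multiple of three and accumulates each colour channel in its own enumerate pass over a strided byte stream (data[0::3]/[1::3]/[2::3]), eliminating the hex encoding, string padding, 6-char slicing and int(_,16) re-parsing of A.
import Mathlib
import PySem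

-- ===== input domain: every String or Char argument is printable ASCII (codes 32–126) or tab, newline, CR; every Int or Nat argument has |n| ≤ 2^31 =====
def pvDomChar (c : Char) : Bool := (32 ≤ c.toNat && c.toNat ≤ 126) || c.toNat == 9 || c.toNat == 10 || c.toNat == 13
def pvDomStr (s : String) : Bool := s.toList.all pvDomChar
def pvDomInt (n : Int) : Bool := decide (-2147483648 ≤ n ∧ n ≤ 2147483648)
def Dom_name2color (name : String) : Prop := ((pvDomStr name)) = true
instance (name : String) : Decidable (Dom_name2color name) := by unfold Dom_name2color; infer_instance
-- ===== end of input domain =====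

-- B re-derives the colour from the raw utf-8 bytes with three strided enumerate passes
-- instead of A's hex-string encode / pad / 6-char-slice / int(_,16) re-parse loop (objective: idiomatic).

-- ===== shared builtin transliterations (used by both Pythons letter for letter) =====

-- bytes(s, 'utf-8') as a list of byte values; exact for the ASCII strings of Dom_name2color
def pyBytes (s : String) : List Nat := s.toList.map Char.toNat

-- a lowercase hex digit; exact for n < 16 (the only arguments either program produces)
def hexDig (n : Nat) : Char := if n < 10 then Char.ofNat (48 + n) else Char.ofNat (87 + n)

-- hex(n).replace('0x','') for n > 0: Python's lowercase hex digits, most significant first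
def hexChars (n : Nat) : List Char :=
  if h : n = 0 then [] else hexChars (n / 16) ++ [hexDig (n % 16)]
termination_by n
decreasing_by exact Nat.div_lt_self (Nat.pos_of_ne_zero h) (by norm_num)

-- hex(x).replace('0x','')[-2:]; exact for x > 0 (both programs only format ints ≥ 256)
def fmt2 (x : Int) : List Char := PySem.List.slice (hexChars x.toNat) (some (-2)) none

-- int(s, 16); exact for the nonempty lowercase-hex-digit strings A passes to it
def hexVal (c : Char) : Int := if 97 ≤ c.toNat then (c.toNat : Int) - 87 else (c.toNat : Int) - 48
def parse16 (l : List Char) : Int := l.foldl (fun a c => 16 * a + hexVal c) 0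

-- ===== PORT A =====

-- bytes(name,'utf-8').hex()
def pyBytesHex (bs : List Nat) : List Char := bs.flatMap (fun b => [hexDig (b / 16), hexDig (b % 16)])

-- the body of A's for-loop over ii in range(nh)
def stepA (h : List Char) (acc : Int × Int × Int) (ii : Int) : Int × Int × Int :=
  let hi := PySem.List.slice h (some (ii * 6)) (some ((ii + 1) * 6))
  (acc.1 + parse16 (PySem.List.slice hi (some 0) (some 2)) * (ii + 1) * 3,
   acc.2.1 + parse16 (PySem.List.slice hi (some 2) (some 4)) * (ii + 1) * 5,
   acc.2.2 + parse16 (PySem.List.slice hi (some 4) (some 6)) * (ii + 1) * 7)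

def name2color (name : String) : String :=
  let h := pyBytesHex (pyBytes name)
  let nh := h.length / 6 + 1
  let nh2 := nh * 6
  let h := if h.length < nh2 then h ++ List.replicate (nh2 - h.length) '0' else h
  let rgb := (PySem.List.pyRange 0 (nh : Int) 1).foldl (stepA h) (256, 256, 256)
  String.ofList ('#' :: (fmt2 rgb.1 ++ fmt2 rgb.2.1 ++ fmt2 rgb.2.2))

-- ===== PORT B =====

-- data[0::3]: every third element starting at the head
def stride3 : List Nat → List Nat
  | [] => []
  | a :: rest => a :: stride3 (rest.drop 2)
termination_by l => l.length
decreasing_by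
  simp only [List.length_drop, List.length_cons]
  omega

-- the body of B's channel loops: acc += (i+1)*c*v
def stepB (c : Int) (r : Int) (iv : Int × Nat) : Int := r + (iv.1 + 1) * c * (iv.2 : Int)

def name2color_alt (name : String) : String :=
  let data := pyBytes name
  let nh := data.length / 3 + 1
  let data := data ++ List.replicate (nh * 3 - data.length) 0
  let r := (PySem.List.enumerate (stride3 data)).foldl (stepB 3) 256
  let g := (PySem.List.enumerate (stride3 (data.drop 1))).foldl (stepB 5) 256
  let b := (PySem.List.enumerate (stride3 (data.drop 2))).foldl (stepB 7) 256
  String.ofList ('#' :: (fmt2 r ++ fmt2 g ++ fmt2 b))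

-- ===== PRECONDITION & SPEC =====
def Spec_name2color (name : String) (out : String) : Prop := out = name2color_alt name
instance (name : String) (out : String) : Decidable (Spec_name2color name out) := by unfold Spec_name2color; infer_instance

-- ===== CLAIM (what is proved, stated in full; the proofs are below) =====
def Claim_equal_name2color : Prop := ∀ (name : String), Dom_name2color name → Spec_name2color name (name2color name)

-- ===== LEMMAS AND PROOFS =====

-- the common weighted byte-triple accumulation both loop shapes compute
def sums3 : List Nat → Int → Int × Int × Int → Int × Int × Int
  | a :: b :: c :: rest, k, (r, g, bl) =>
      sums3 rest (k + 1) (r + (a : Int) * (k + 1) * 3, g + (b : Int) * (k + 1) * 5, bl + (c : Int) * (k + 1) * 7)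
  | _, _, acc => acc

theorem hexVal_hexDig (d : Nat) (hd : d < 16) : hexVal (hexDig d) = (d : Int) := by
  interval_cases d <;> decide

theorem parse16_pair (a : Nat) (ha : a < 256) :
    parse16 [hexDig (a / 16), hexDig (a % 16)] = (a : Int) := by
  have h1 : hexVal (hexDig (a / 16)) = ((a / 16 : Nat) : Int) := hexVal_hexDig _ (by omega)
  have h2 : hexVal (hexDig (a % 16)) = ((a % 16 : Nat) : Int) := hexVal_hexDig _ (by omega)
  simp [parse16, h1, h2]
  omega

theorem pyBytesHex_length (bs : List Nat) : (pyBytesHex bs).length = 2 * bs.length := by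
  induction bs with
  | nil => simp [pyBytesHex]
  | cons a t ih => simp [pyBytesHex] at ih ⊢; omega

theorem pyBytesHex_append (xs ys : List Nat) :
    pyBytesHex (xs ++ ys) = pyBytesHex xs ++ pyBytesHex ys := by
  simp [pyBytesHex]

theorem pyBytesHex_replicate_zero (k : Nat) :
    pyBytesHex (List.replicate k 0) = List.replicate (2 * k) '0' := by
  induction k with
  | zero => simp [pyBytesHex]
  | succ n ih =>
      have : hexDig 0 = '0' := by decide
      simp [List.replicate_succ, pyBytesHex, Nat.mul_succ] at ih ⊢
      simp [ih, this]

theorem stride3_nil : stride3 [] = [] := by rw [stride3.eq_def]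

theorem stride3_cons (a : Nat) (rest : List Nat) :
    stride3 (a :: rest) = a :: stride3 (rest.drop 2) := by
  rw [stride3.eq_def]

theorem loopA_eq_sums3 (m : Nat) :
    ∀ (P : List Nat) (h : List Char) (s : Nat) (acc : Int × Int × Int),
      P.length = 3 * m → (∀ x ∈ P, x < 256) → h.drop (6 * s) = pyBytesHex P →
      (PySem.List.pyRange (s : Int) ((s + m : Nat) : Int) 1).foldl (stepA h) acc
        = sums3 P (s : Int) acc := by
  induction m with
  | zero =>
      intro P h s acc hlen _ _
      have hP : P = [] := List.eq_nil_of_length_eq_zero (by omega)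
      subst hP
      rw [PySem.List.pyRange_one_eq_nil (by omega)]
      simp [sums3]
  | succ m ih =>
      intro P h s acc hlen hlt hdrop
      match P, hlen with
      | a :: b :: c :: rest, hlen =>
        have hrest : rest.length = 3 * m := by
          simp only [List.length_cons] at hlen; omega
        have ha : a < 256 := hlt a (by simp)
        have hb : b < 256 := hlt b (by simp)
        have hc : c < 256 := hlt c (by simp)
        rw [PySem.List.pyRange_one_cons (by exact_mod_cast (by omega : s < s + (m + 1)))]
        rw [List.foldl_cons]
        have hhead : stepA h acc (s : Int) =
            (acc.1 + (a : Int) * ((s : Int) + 1) * 3,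
             acc.2.1 + (b : Int) * ((s : Int) + 1) * 5,
             acc.2.2 + (c : Int) * ((s : Int) + 1) * 7) := by
          have e1 : (s : Int) * 6 = ((6 * s : Nat) : Int) := by push_cast; ring
          have e2 : ((s : Int) + 1) * 6 = ((6 * s + 6 : Nat) : Int) := by push_cast; ring
          have h66 : 6 * s + 6 - 6 * s = 6 := by omega
          have htake : ((pyBytesHex (a :: b :: c :: rest)).take 6) =
              [hexDig (a / 16), hexDig (a % 16), hexDig (b / 16), hexDig (b % 16),
               hexDig (c / 16), hexDig (c % 16)] := by
            simp [pyBytesHex]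
          have s02 : PySem.List.slice [hexDig (a / 16), hexDig (a % 16), hexDig (b / 16),
              hexDig (b % 16), hexDig (c / 16), hexDig (c % 16)] (some 0) (some 2) =
              [hexDig (a / 16), hexDig (a % 16)] := by
            simp [PySem.List.slice, PySem.List.clampIdx]
          have s24 : PySem.List.slice [hexDig (a / 16), hexDig (a % 16), hexDig (b / 16),
              hexDig (b % 16), hexDig (c / 16), hexDig (c % 16)] (some 2) (some 4) =
              [hexDig (b / 16), hexDig (b % 16)] := by
            simp [PySem.List.slice, PySem.List.clampIdx]
          have s46 : PySem.List.slice [hexDig (a / 16), hexDig (a % 16), hexDig (b / 16),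
              hexDig (b % 16), hexDig (c / 16), hexDig (c % 16)] (some 4) (some 6) =
              [hexDig (c / 16), hexDig (c % 16)] := by
            simp [PySem.List.slice, PySem.List.clampIdx]
          unfold stepA
          simp only [e1, e2, PySem.List.slice_natCast, hdrop, h66, htake, s02, s24, s46,
            parse16_pair a ha, parse16_pair b hb, parse16_pair c hc]
        rw [hhead]
        have hdrop' : h.drop (6 * (s + 1)) = pyBytesHex rest := by
          have hdd : h.drop (6 * (s + 1)) = (h.drop (6 * s)).drop 6 := by
            rw [List.drop_drop]; congr 1
          rw [hdd, hdrop]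
          simp [pyBytesHex]
        have hIH := ih rest h (s + 1)
          (acc.1 + (a : Int) * ((s : Int) + 1) * 3,
           acc.2.1 + (b : Int) * ((s : Int) + 1) * 5,
           acc.2.2 + (c : Int) * ((s : Int) + 1) * 7)
          hrest (fun x hx => hlt x (by simp [hx])) hdrop'
        have ecast : ((s + 1 : Nat) : Int) = (s : Int) + 1 := by push_cast; ring
        have eend : s + 1 + m = s + (m + 1) := by omega
        rw [ecast, eend] at hIH
        rw [hIH]
        obtain ⟨r, g, bl⟩ := acc
        simp [sums3]

theorem sums3_eq_strides (m : Nat) :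
    ∀ (P : List Nat) (k r g b : Int), P.length = 3 * m →
      sums3 P k (r, g, b) =
        ((PySem.List.enumerate (stride3 P) k).foldl (stepB 3) r,
         (PySem.List.enumerate (stride3 (P.drop 1)) k).foldl (stepB 5) g,
         (PySem.List.enumerate (stride3 (P.drop 2)) k).foldl (stepB 7) b) := by
  induction m with
  | zero =>
      intro P k r g b hlen
      have hP : P = [] := List.eq_nil_of_length_eq_zero (by omega)
      subst hP
      simp [sums3, stride3_nil, PySem.List.enumerate_nil]
  | succ m ih =>
      intro P k r g b hlen
      match P, hlen with
      | a :: b' :: c :: rest, hlen =>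
        have hrest : rest.length = 3 * m := by
          simp only [List.length_cons] at hlen; omega
        have e0 : stride3 (a :: b' :: c :: rest) = a :: stride3 rest := by
          rw [stride3_cons]; simp
        have e1 : stride3 ((a :: b' :: c :: rest).drop 1) = b' :: stride3 (rest.drop 1) := by
          simp only [List.drop_succ_cons, List.drop_zero]
          rw [stride3_cons]; simp
        have e2 : stride3 ((a :: b' :: c :: rest).drop 2) = c :: stride3 (rest.drop 2) := by
          simp only [List.drop_succ_cons, List.drop_zero]
          rw [stride3_cons]
        rw [show sums3 (a :: b' :: c :: rest) k (r, g, b) =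
              sums3 rest (k + 1)
                (r + (a : Int) * (k + 1) * 3, g + (b' : Int) * (k + 1) * 5,
                 b + (c : Int) * (k + 1) * 7) from rfl]
        rw [ih rest (k + 1) _ _ _ hrest]
        rw [e0, e1, e2]
        rw [PySem.List.enumerate_cons, PySem.List.enumerate_cons, PySem.List.enumerate_cons]
        simp only [List.foldl_cons]
        have c3 : stepB 3 r (k, a) = r + (a : Int) * (k + 1) * 3 := by simp [stepB]; ring
        have c5 : stepB 5 g (k, b') = g + (b' : Int) * (k + 1) * 5 := by simp [stepB]; ring
        have c7 : stepB 7 b (k, c) = b + (c : Int) * (k + 1) * 7 := by simp [stepB]; ring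
        rw [c3, c5, c7]

-- ===== VERDICT (by name: the statement is the Claim_ definition above) =====
theorem name2color_spec : Claim_equal_name2color := by
  intro name hdom
  have hlt : ∀ x ∈ pyBytes name, x < 256 := by
    intro x hx
    simp [pyBytes] at hx
    obtain ⟨ch, hch, hx⟩ := hx
    have hd : pvDomChar ch = true := by
      unfold Dom_name2color pvDomStr at hdom
      simp [List.all_eq_true] at hdom
      exact hdom ch hch
    simp [pvDomChar] at hd
    omega
  unfold Spec_name2color name2color name2color_alt
  have hhlen : (pyBytesHex (pyBytes name)).length = 2 * (pyBytes name).length :=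
    pyBytesHex_length _
  have hnh : (pyBytesHex (pyBytes name)).length / 6 + 1 = (pyBytes name).length / 3 + 1 := by
    omega
  have hif : (pyBytesHex (pyBytes name)).length < ((pyBytes name).length / 3 + 1) * 6 := by
    omega
  set P : List Nat := pyBytes name ++
      List.replicate (((pyBytes name).length / 3 + 1) * 3 - (pyBytes name).length) 0 with hP
  have hPlen : P.length = 3 * ((pyBytes name).length / 3 + 1) := by
    simp [hP]; omega
  have hPlt : ∀ x ∈ P, x < 256 := by
    intro x hx
    rcases List.mem_append.mp hx with h1 | h2
    · exact hlt x h1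
    · simp [List.eq_of_mem_replicate h2]
  have hpad : pyBytesHex (pyBytes name) ++ List.replicate
      (((pyBytes name).length / 3 + 1) * 6 - (pyBytesHex (pyBytes name)).length) '0'
      = pyBytesHex P := by
    rw [hP, pyBytesHex_append, pyBytesHex_replicate_zero]
    congr 2
    omega
  simp only [hnh, if_pos hif]
  rw [hpad]
  have hA := loopA_eq_sums3 ((pyBytes name).length / 3 + 1) P (pyBytesHex P) 0
    (256, 256, 256) hPlen hPlt (by simp)
  have hB := sums3_eq_strides ((pyBytes name).length / 3 + 1) P 0 256 256 256 hPlen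
  simp only [Nat.zero_add, Nat.cast_zero] at hA
  rw [hA, hB]
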